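-- pv_equiv track=rewrite | github.com/BenCsn-sudo/AdventOfCode---Day4 | step_2.py | step_grid
-- ===== SOURCE A (Python) =====
-- def voisins(grid, p):
--     """
--     Renvoie le nombre de voisins @ autour d'une coordonnée p (x, y)
--     x = ligne, y = colonne
--     """
--     compteur = 0
--     x0, y0 = p
--     # Liste des 8 directions
--     directions = [(-1, -1), (-1, 0), (-1, 1),
--                   (0, -1),           (0, 1),
--                   (1, -1),  (1, 0),  (1, 1)]
--
--     for dx, dy in directions:
--         x1, y1 = x0 + dx, y0 + dy
--
--         if 0 <= x1 < len(grid) and 0 <= y1 < len(grid[0]):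
--             if grid[x1][y1] == '@':
--                 compteur += 1
--
--     return compteur
--
-- def step_grid(grid):
--     """
--     Supprime les rouleaux et renvoie le nombre de suppressions effectuées
--     """
--     a_supprimer = [] # Liste pour stocker les coordonnées
--
--     for i in range(len(grid)):
--         for n in range(len(grid[0])):
--             if grid[i][n] == '@':
--                 vois = voisins(grid, (i, n))
--                 if vois < 4:
--                     a_supprimer.append((i, n))
--
--     # On applique les suppressions APRES avoir tout vérifié
--     for i, n in a_supprimer:
--         grid[i][n] = '.'
--
--     return len(a_supprimer) # On retourne combien on en a enlevé
-- ===== SOURCE B (Python) =====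
-- def step_grid(grid):
--     """
--     Scatter version: one pass accumulates, for every cell, how many '@'
--     neighbours it has (each '@' cell adds 1 to its 8 in-bounds neighbours
--     in a counts matrix); a second pass collects the '@' cells whose count
--     is < 4, deletes them and returns how many were deleted.
--     """
--     if not grid:
--         return 0
--     h = len(grid)
--     w = len(grid[0])
--     counts = [[0] * w for _ in range(h)]
--     for i in range(h):
--         for n in range(w):
--             if grid[i][n] == '@':
--                 for dx in (-1, 0, 1):
--                     for dy in (-1, 0, 1):
--                         if dx == 0 and dy == 0:
--                             continue
--                         x, y = i + dx, n + dy
--                         if 0 <= x < h and 0 <= y < w: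
--                             counts[x][y] += 1
--     a_supprimer = [(i, n) for i in range(h) for n in range(w)
--                    if grid[i][n] == '@' and counts[i][n] < 4]
--     for i, n in a_supprimer:
--         grid[i][n] = '.'
--     return len(a_supprimer)
-- ===== Notes on version B (the rewrite author's own statement) =====
-- stated objective: alternative
-- what changed: Replaces A's per-cell gather (calling voisins, which probes the 8 neighbours of each '@' cell) with a scatter pass: each '@' cell adds 1 to its in-bounds neighbours in a counts matrix, then a second pass collects '@' cells with counts < 4; return value and the in-place '.'-mutation are identical.
import Mathlib
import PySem

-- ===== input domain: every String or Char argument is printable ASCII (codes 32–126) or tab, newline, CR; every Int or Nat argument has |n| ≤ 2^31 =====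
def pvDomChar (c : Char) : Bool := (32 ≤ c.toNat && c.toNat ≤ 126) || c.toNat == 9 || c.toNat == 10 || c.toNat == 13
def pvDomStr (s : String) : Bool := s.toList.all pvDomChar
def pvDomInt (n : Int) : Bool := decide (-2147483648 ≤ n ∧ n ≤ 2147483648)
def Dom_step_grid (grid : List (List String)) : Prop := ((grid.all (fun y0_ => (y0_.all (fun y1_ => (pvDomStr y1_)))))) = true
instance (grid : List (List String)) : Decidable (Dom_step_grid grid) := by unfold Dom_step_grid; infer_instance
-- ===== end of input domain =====

-- B replaces A's per-cell neighbour gather with a scatter pass into a counts matrix (alternative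
-- decomposition, same cost). Both Pythons mutate `grid` in place identically; the equivalence
-- proved here is about the RETURN value.

-- ===== PORT A =====
-- the 8 directions of `voisins`
def pvDirs : List (Int × Int) :=
  [(-1, -1), (-1, 0), (-1, 1), (0, -1), (0, 1), (1, -1), (1, 0), (1, 1)]

-- `voisins(grid, p)`: count '@' among the 8 in-bounds neighbours of p
def voisins (grid : List (List String)) (p : Int × Int) : Int :=
  pvDirs.foldl (fun compteur d =>
    if 0 ≤ p.1 + d.1 ∧ p.1 + d.1 < (grid.length : Int) ∧
       0 ≤ p.2 + d.2 ∧ p.2 + d.2 < ((grid.headD []).length : Int) then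
      if PySem.List.pyGetD (PySem.List.pyGetD grid (p.1 + d.1) []) (p.2 + d.2) "" == "@" then
        compteur + 1
      else compteur
    else compteur) 0

-- `step_grid`: collect '@' cells with voisins < 4; the final Python loop only mutates `grid`
-- in place ('.'), so the returned value is the length of the collected list.
def step_grid (grid : List (List String)) : Int :=
  let a_supprimer : List (Int × Int) :=
    (PySem.List.pyRange 0 (grid.length : Int) 1).foldl (fun acc i =>
      (PySem.List.pyRange 0 ((grid.headD []).length : Int) 1).foldl (fun acc n =>
        if PySem.List.pyGetD (PySem.List.pyGetD grid i []) n "" == "@" then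
          if voisins grid (i, n) < 4 then acc ++ [(i, n)] else acc
        else acc) acc) []
  (a_supprimer.length : Int)

-- ===== PORT B =====
-- counts[x][y] += 1  (x, y in bounds when called)
def pvBump (c : List (List Int)) (x y : Int) : List (List Int) :=
  c.modify x.toNat (fun row => row.modify y.toNat (· + 1))

def step_grid_alt (grid : List (List String)) : Int :=
  if grid = [] then 0 else
  let h : Int := (grid.length : Int)
  let w : Int := ((grid.headD []).length : Int)
  -- scatter: every '@' cell adds 1 to each of its 8 in-bounds neighbours
  let counts : List (List Int) :=
    (PySem.List.pyRange 0 h 1).foldl (fun c i =>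
      (PySem.List.pyRange 0 w 1).foldl (fun c n =>
        if PySem.List.pyGetD (PySem.List.pyGetD grid i []) n "" == "@" then
          ([-1, 0, 1] : List Int).foldl (fun c dx =>
            ([-1, 0, 1] : List Int).foldl (fun c dy =>
              if dx = 0 ∧ dy = 0 then c
              else if 0 ≤ i + dx ∧ i + dx < h ∧ 0 ≤ n + dy ∧ n + dy < w then
                pvBump c (i + dx) (n + dy)
              else c) c) c
        else c) c)
      (List.replicate h.toNat (List.replicate w.toNat (0 : Int)))
  -- collect '@' cells whose scattered count is < 4 (the Python then mutates grid in place)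
  let a_supprimer : List (Int × Int) :=
    (PySem.List.pyRange 0 h 1).foldl (fun acc i =>
      (PySem.List.pyRange 0 w 1).foldl (fun acc n =>
        if PySem.List.pyGetD (PySem.List.pyGetD grid i []) n "" == "@" ∧
           PySem.List.pyGetD (PySem.List.pyGetD counts i []) n 0 < 4 then
          acc ++ [(i, n)]
        else acc) acc) []
  (a_supprimer.length : Int)

-- ===== PRECONDITION & SPEC =====
-- Pre_ excludes exactly the grids where Python A raises IndexError: some row shorter than row 0
-- (A indexes every row at all columns below len(grid[0])).
def Pre_step_grid (grid : List (List String)) : Prop :=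
  ∀ row ∈ grid, (grid.headD []).length ≤ row.length
instance (grid : List (List String)) : Decidable (Pre_step_grid grid) := by
  unfold Pre_step_grid; infer_instance

def pvWitness_step_grid : List (List String) := [["@", "@"], ["@", "."]]

def Spec_step_grid (grid : List (List String)) (out : Int) : Prop := out = step_grid_alt grid
instance (grid : List (List String)) (out : Int) : Decidable (Spec_step_grid grid out) := by
  unfold Spec_step_grid; infer_instance

-- ===== CLAIM (what is proved, stated in full; the proofs are below) =====
def Claim_equal_step_grid : Prop :=
  ∀ (grid : List (List String)), Dom_step_grid grid → Pre_step_grid grid →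
    Spec_step_grid grid (step_grid grid)

-- ===== LEMMAS AND PROOFS =====

-- cell value test: grid[q] == '@'
def pvAt (grid : List (List String)) (q : Int × Int) : Bool :=
  PySem.List.pyGetD (PySem.List.pyGetD grid q.1 []) q.2 "" == "@"

-- in-bounds test
def pvInb (h w : Int) (q : Int × Int) : Bool :=
  decide (0 ≤ q.1 ∧ q.1 < h ∧ 0 ≤ q.2 ∧ q.2 < w)

-- 8-adjacency, arithmetically
def pvAdj (q p : Int × Int) : Bool :=
  decide (¬(q.1 = p.1 ∧ q.2 = p.2) ∧ q.1 - p.1 ≤ 1 ∧ p.1 - q.1 ≤ 1 ∧ q.2 - p.2 ≤ 1 ∧ p.2 - q.2 ≤ 1)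

-- row-major list of all in-bounds cells
def pvCells (h w : Int) : List (Int × Int) :=
  (PySem.List.pyRange 0 h 1).flatMap (fun i => (PySem.List.pyRange 0 w 1).map (fun n => (i, n)))

-- counts-matrix shape
def pvShape (h w : Nat) (c : List (List Int)) : Prop :=
  c.length = h ∧ ∀ k : Nat, k < h → (c.getD k []).length = w

-- counts lookup as B performs it
def pvGet2 (c : List (List Int)) (p : Int × Int) : Int :=
  PySem.List.pyGetD (PySem.List.pyGetD c p.1 []) p.2 0

-- one scatter step of B (body of B's double loop over cells)
def pvStep (grid : List (List String)) (h w : Int) (c : List (List Int)) (q : Int × Int) :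
    List (List Int) :=
  if PySem.List.pyGetD (PySem.List.pyGetD grid q.1 []) q.2 "" == "@" then
    ([-1, 0, 1] : List Int).foldl (fun c dx =>
      ([-1, 0, 1] : List Int).foldl (fun c dy =>
        if dx = 0 ∧ dy = 0 then c
        else if 0 ≤ q.1 + dx ∧ q.1 + dx < h ∧ 0 ≤ q.2 + dy ∧ q.2 + dy < w then
          pvBump c (q.1 + dx) (q.2 + dy)
        else c) c) c
  else c

lemma pvShape_bump {h w : Nat} {c : List (List Int)} (hs : pvShape h w c) (x y : Int) :
    pvShape h w (pvBump c x y) := by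
  obtain ⟨hl, hr⟩ := hs
  refine ⟨by simpa [pvBump] using hl, fun k hk => ?_⟩
  have hk' : k < c.length := by omega
  have := hr k hk
  simp only [pvBump, List.getD_eq_getElem?_getD, List.getElem?_modify,
    List.getElem?_eq_getElem hk'] at *
  split <;> simpa

lemma pvGet2_eq {c : List (List Int)} {p : Int × Int} (h1 : 0 ≤ p.1) (h2 : 0 ≤ p.2) :
    pvGet2 c p = (c.getD p.1.toNat []).getD p.2.toNat 0 := by
  simp [pvGet2, PySem.List.pyGetD_of_nonneg _ _ h1, PySem.List.pyGetD_of_nonneg _ _ h2]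

lemma pvGetD_modify {α : Type} (l : List α) (i k : Nat) (f : α → α) (d : α) :
    (l.modify i f).getD k d = if i = k ∧ k < l.length then f (l.getD k d) else l.getD k d := by
  rw [List.getD_eq_getElem?_getD, List.getElem?_modify, List.getD_eq_getElem?_getD]
  rcases Nat.lt_or_ge k l.length with hk | hk
  · rw [List.getElem?_eq_getElem hk]
    by_cases hik : i = k <;> simp [hik, hk]
  · rw [List.getElem?_eq_none (by omega)]
    simp [Nat.not_lt.mpr hk]

lemma pvGet2_bump {h w : Nat} {c : List (List Int)} (hs : pvShape h w c) {x y : Int}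
    (hx : 0 ≤ x ∧ x < (h : Int) ∧ 0 ≤ y ∧ y < (w : Int)) {p : Int × Int}
    (hp : pvInb (h : Int) (w : Int) p = true) :
    pvGet2 (pvBump c x y) p = pvGet2 c p + (if x = p.1 ∧ y = p.2 then 1 else 0) := by
  obtain ⟨hx1, hx2, hx3, hx4⟩ := hx
  simp only [pvInb, decide_eq_true_eq] at hp
  obtain ⟨hp1, hp2, hp3, hp4⟩ := hp
  obtain ⟨hl, hr⟩ := hs
  have hkc : p.1.toNat < c.length := by omega
  have hrl : (c.getD p.1.toNat []).length = w := hr _ (by omega)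
  rw [pvGet2_eq hp1 hp3, pvGet2_eq hp1 hp3]
  unfold pvBump
  rw [pvGetD_modify]
  by_cases hxp : x.toNat = p.1.toNat
  · rw [if_pos ⟨hxp, hkc⟩, pvGetD_modify]
    by_cases hyp : y.toNat = p.2.toNat
    · rw [if_pos ⟨hyp, by omega⟩, if_pos (⟨by omega, by omega⟩ : x = p.1 ∧ y = p.2)]
    · rw [if_neg (by rintro ⟨e, -⟩; omega), if_neg (by rintro ⟨-, e⟩; omega)]
      ring
  · rw [if_neg (by rintro ⟨e, -⟩; omega), if_neg (by rintro ⟨e, -⟩; omega)]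
    ring

-- a guarded bump, seen through pvGet2 at an in-bounds point
lemma pvGet2_cbump {h w : Nat} {c : List (List Int)} (hs : pvShape h w c) (x y : Int)
    {p : Int × Int} (hp : pvInb (h : Int) (w : Int) p = true) :
    pvGet2 (if 0 ≤ x ∧ x < (h : Int) ∧ 0 ≤ y ∧ y < (w : Int) then pvBump c x y else c) p
      = pvGet2 c p + (if x = p.1 ∧ y = p.2 then 1 else 0) := by
  by_cases hg : 0 ≤ x ∧ x < (h : Int) ∧ 0 ≤ y ∧ y < (w : Int)
  · rw [if_pos hg]
    exact pvGet2_bump hs hg hp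
  · simp only [pvInb, decide_eq_true_eq] at hp
    rw [if_neg hg, if_neg]
    · ring
    · rintro ⟨rfl, rfl⟩
      exact hg ⟨hp.1, hp.2.1, hp.2.2.1, hp.2.2.2⟩

lemma pvShape_cbump {h w : Nat} {c : List (List Int)} (hs : pvShape h w c) (x y : Int) :
    pvShape h w (if 0 ≤ x ∧ x < (h : Int) ∧ 0 ≤ y ∧ y < (w : Int) then pvBump c x y else c) := by
  split
  · exact pvShape_bump hs x y
  · exact hs

lemma pvShape_step {h w : Nat} {c : List (List Int)} (hs : pvShape h w c)
    (grid : List (List String)) (q : Int × Int) :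
    pvShape h w (pvStep grid (h : Int) (w : Int) c q) := by
  unfold pvStep
  split
  · simp only [List.foldl_cons, List.foldl_nil]
    repeat' apply pvShape_cbump
    exact hs
  · exact hs

-- pointwise effect of a list of guarded bumps around q
lemma pvGet2_offs {h w : Nat} (q : Int × Int) {p : Int × Int}
    (hp : pvInb (h : Int) (w : Int) p = true) (os : List (Int × Int)) :
    ∀ c : List (List Int), pvShape h w c →
    pvGet2 (os.foldl (fun c d =>
        if 0 ≤ q.1 + d.1 ∧ q.1 + d.1 < (h : Int) ∧ 0 ≤ q.2 + d.2 ∧ q.2 + d.2 < (w : Int) then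
          pvBump c (q.1 + d.1) (q.2 + d.2)
        else c) c) p
      = pvGet2 c p + (os.countP (fun d => decide (q.1 + d.1 = p.1 ∧ q.2 + d.2 = p.2)) : Int) := by
  induction os with
  | nil => intro c hs; simp
  | cons d os ih =>
    intro c hs
    rw [List.foldl_cons, ih _ (pvShape_cbump hs (q.1 + d.1) (q.2 + d.2)),
      pvGet2_cbump hs _ _ hp, List.countP_cons]
    by_cases hd : q.1 + d.1 = p.1 ∧ q.2 + d.2 = p.2
    · simp [hd]
      ring
    · simp [hd]

-- pointwise effect of one scatter step
lemma pvGet2_step {h w : Nat} {c : List (List Int)} (hs : pvShape h w c)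
    (grid : List (List String)) (q : Int × Int) {p : Int × Int}
    (hp : pvInb (h : Int) (w : Int) p = true) :
    pvGet2 (pvStep grid (h : Int) (w : Int) c q) p
      = pvGet2 c p + (if pvAt grid q && pvAdj q p then 1 else 0) := by
  unfold pvStep
  by_cases ha : (PySem.List.pyGetD (PySem.List.pyGetD grid q.1 []) q.2 "" == "@") = true
  · rw [if_pos ha]
    have hfold : (([-1, 0, 1] : List Int).foldl (fun c dx =>
        ([-1, 0, 1] : List Int).foldl (fun c dy =>
          if dx = 0 ∧ dy = 0 then c
          else if 0 ≤ q.1 + dx ∧ q.1 + dx < (h : Int) ∧ 0 ≤ q.2 + dy ∧ q.2 + dy < (w : Int) then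
            pvBump c (q.1 + dx) (q.2 + dy)
          else c) c) c)
        = pvDirs.foldl (fun c d =>
          if 0 ≤ q.1 + d.1 ∧ q.1 + d.1 < (h : Int) ∧ 0 ≤ q.2 + d.2 ∧ q.2 + d.2 < (w : Int) then
            pvBump c (q.1 + d.1) (q.2 + d.2)
          else c) c := by
      simp only [List.foldl_cons, List.foldl_nil, pvDirs, Int.reduceEq, and_true,
        and_false, if_true, if_false]
    rw [hfold, pvGet2_offs q hp pvDirs c hs]
    have hat : pvAt grid q = true := ha
    simp only [hat, Bool.true_and, pvAdj, pvDirs, List.countP_cons, List.countP_nil,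
      decide_eq_true_eq]
    obtain ⟨a, b⟩ := q
    obtain ⟨x, y⟩ := p
    simp only []
    push_cast
    split_ifs <;> omega
  · rw [if_neg ha]
    have : (pvAt grid q && pvAdj q p) = false := by
      simp only [pvAt, Bool.and_eq_false_iff]
      left
      exact Bool.not_eq_true _ ▸ (by simpa using ha)
    rw [this]
    simp

-- pointwise effect of scattering a whole list of cells
lemma pvGet2_foldl_step {h w : Nat} (grid : List (List String)) (L : List (Int × Int)) :
    ∀ (c : List (List Int)), pvShape h w c → ∀ {p : Int × Int},
      pvInb (h : Int) (w : Int) p = true →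
      pvGet2 (L.foldl (pvStep grid (h : Int) (w : Int)) c) p
        = pvGet2 c p + (L.countP (fun q => pvAt grid q && pvAdj q p) : Int) := by
  induction L with
  | nil => intro c hs p hp; simp
  | cons q L ih =>
    intro c hs p hp
    rw [List.foldl_cons, ih _ (pvShape_step hs grid q) hp, pvGet2_step hs grid q hp,
      List.countP_cons]
    cases hc : (pvAt grid q && pvAdj q p) <;> (simp [hc]; try ring)

lemma pvShape_init (h w : Nat) :
    pvShape h w (List.replicate h (List.replicate w (0 : Int))) := by
  refine ⟨by simp, fun k hk => ?_⟩
  rw [List.getD_eq_getElem?_getD, List.getElem?_replicate, if_pos hk]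
  simp

lemma pvGet2_init {h w : Nat} {p : Int × Int} (hp : pvInb (h : Int) (w : Int) p = true) :
    pvGet2 (List.replicate h (List.replicate w (0 : Int))) p = 0 := by
  simp only [pvInb, decide_eq_true_eq] at hp
  obtain ⟨h1, h2, h3, h4⟩ := hp
  have b1 : p.1.toNat < h := by omega
  have b2 : p.2.toNat < w := by omega
  simp [pvGet2_eq h1 h3, List.getD_eq_getElem?_getD, b1, b2]

lemma pvMem_cells {h w : Int} {q : Int × Int} : q ∈ pvCells h w ↔ pvInb h w q = true := by
  simp only [pvCells, List.mem_flatMap, List.mem_map, PySem.List.mem_pyRange_one, pvInb,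
    decide_eq_true_eq]
  constructor
  · rintro ⟨i, hi, n, hn, rfl⟩
    exact ⟨hi.1, hi.2, hn.1, hn.2⟩
  · rintro ⟨h1, h2, h3, h4⟩
    exact ⟨q.1, ⟨h1, h2⟩, q.2, ⟨h3, h4⟩, rfl⟩

lemma pvNodup_cells (h w : Int) : (pvCells h w).Nodup := by
  rw [pvCells, List.nodup_flatMap]
  constructor
  · intro i _
    exact (PySem.List.nodup_pyRange_one _ _).map (fun a b hab => by
      simpa using congrArg Prod.snd hab)
  · refine List.Pairwise.imp ?_ (PySem.List.pairwise_lt_pyRange_one _ _)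
    intro i j hij
    intro a ha hb
    simp only [List.mem_map] at ha hb
    obtain ⟨n, -, rfl⟩ := ha
    obtain ⟨m, -, hb'⟩ := hb
    have := congrArg Prod.fst hb'
    simp at this
    omega

lemma pvMem_nbrs {p q : Int × Int} :
    q ∈ pvDirs.map (fun d => (p.1 + d.1, p.2 + d.2)) ↔ pvAdj q p = true := by
  obtain ⟨a, b⟩ := q
  obtain ⟨x, y⟩ := p
  simp only [pvDirs, pvAdj, List.mem_map, List.mem_cons, List.not_mem_nil, or_false,
    Prod.mk.injEq, decide_eq_true_eq]
  constructor
  · rintro ⟨⟨dx, dy⟩, hd, h1, h2⟩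
    simp only [Prod.mk.injEq] at hd
    rcases hd with ⟨e1, e2⟩ | ⟨e1, e2⟩ | ⟨e1, e2⟩ | ⟨e1, e2⟩ | ⟨e1, e2⟩ | ⟨e1, e2⟩ |
      ⟨e1, e2⟩ | ⟨e1, e2⟩ <;> (subst e1; subst e2; simp only [] at h1 h2; omega)
  · rintro ⟨hne, h1, h2, h3, h4⟩
    refine ⟨(a - x, b - y), ?_, by simp, by simp⟩
    simp only [Prod.mk.injEq]
    omega

lemma pvNodup_nbrs (p : Int × Int) :
    (pvDirs.map (fun d => (p.1 + d.1, p.2 + d.2))).Nodup := by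
  refine (by decide : pvDirs.Nodup).map ?_
  intro d e hde
  have h1 := congrArg Prod.fst hde
  have h2 := congrArg Prod.snd hde
  simp only [] at h1 h2
  exact Prod.ext (by omega) (by omega)

-- double counting: gathering over directions = scattering over all cells
lemma pvCount_swap (grid : List (List String)) {h w : Int} {p : Int × Int} :
    (pvCells h w).countP (fun q => pvAt grid q && pvAdj q p)
      = pvDirs.countP (fun d =>
          pvInb h w (p.1 + d.1, p.2 + d.2) && pvAt grid (p.1 + d.1, p.2 + d.2)) := by
  have hmap : pvDirs.countP (fun d =>
      pvInb h w (p.1 + d.1, p.2 + d.2) && pvAt grid (p.1 + d.1, p.2 + d.2))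
      = (pvDirs.map (fun d => (p.1 + d.1, p.2 + d.2))).countP
          (fun q => pvInb h w q && pvAt grid q) := by
    rw [List.countP_map]
    rfl
  rw [hmap, List.countP_eq_length_filter, List.countP_eq_length_filter]
  apply List.Perm.length_eq
  rw [List.perm_ext_iff_of_nodup ((pvNodup_cells h w).filter _) ((pvNodup_nbrs p).filter _)]
  intro q
  simp only [List.mem_filter, pvMem_cells, pvMem_nbrs, Bool.and_eq_true]
  tauto

-- A's voisins as a countP over the direction list
lemma pvVoisins_eq (grid : List (List String)) (p : Int × Int) :
    voisins grid p
      = (pvDirs.countP (fun d =>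
          pvInb (grid.length : Int) ((grid.headD []).length : Int)
            (p.1 + d.1, p.2 + d.2) && pvAt grid (p.1 + d.1, p.2 + d.2)) : Int) := by
  unfold voisins
  rw [PySem.List.foldl_congr_mem' pvDirs _
    (fun compteur d =>
      if (0 ≤ p.1 + d.1 ∧ p.1 + d.1 < (grid.length : Int) ∧
          0 ≤ p.2 + d.2 ∧ p.2 + d.2 < ((grid.headD []).length : Int)) ∧
         (PySem.List.pyGetD (PySem.List.pyGetD grid (p.1 + d.1) []) (p.2 + d.2) "" == "@") = true
       then compteur + 1 else compteur) 0
    (by intro d _ acc; simp only []; split_ifs <;> tauto)]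
  rw [PySem.List.foldl_ite_add_one]
  rw [zero_add]
  congr 1
  apply List.countP_congr
  intro d _
  simp only [pvInb, pvAt]
  by_cases hg : 0 ≤ p.1 + d.1 ∧ p.1 + d.1 < (grid.length : Int) ∧
      0 ≤ p.2 + d.2 ∧ p.2 + d.2 < ((grid.headD []).length : Int)
  · by_cases ha : (PySem.List.pyGetD (PySem.List.pyGetD grid (p.1 + d.1) []) (p.2 + d.2) ""
        == "@") = true
    · simp [hg, ha]
    · simp [hg, ha]
  · simp [hg]

-- B's counts matrix, named (definitionally equal to the let-bound `counts` of step_grid_alt)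
def pvCounts (grid : List (List String)) : List (List Int) :=
  (PySem.List.pyRange 0 (grid.length : Int) 1).foldl (fun c i =>
    (PySem.List.pyRange 0 ((grid.headD []).length : Int) 1).foldl (fun c n =>
      if PySem.List.pyGetD (PySem.List.pyGetD grid i []) n "" == "@" then
        ([-1, 0, 1] : List Int).foldl (fun c dx =>
          ([-1, 0, 1] : List Int).foldl (fun c dy =>
            if dx = 0 ∧ dy = 0 then c
            else if 0 ≤ i + dx ∧ i + dx < (grid.length : Int) ∧
                0 ≤ n + dy ∧ n + dy < ((grid.headD []).length : Int) then
              pvBump c (i + dx) (n + dy)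
            else c) c) c
      else c) c)
    (List.replicate (grid.length : Int).toNat
      (List.replicate ((grid.headD []).length : Int).toNat (0 : Int)))

-- A's collected list, named
def pvFoldA (grid : List (List String)) : List (Int × Int) :=
  (PySem.List.pyRange 0 (grid.length : Int) 1).foldl (fun acc i =>
    (PySem.List.pyRange 0 ((grid.headD []).length : Int) 1).foldl (fun acc n =>
      if PySem.List.pyGetD (PySem.List.pyGetD grid i []) n "" == "@" then
        if voisins grid (i, n) < 4 then acc ++ [(i, n)] else acc
      else acc) acc) []

-- B's collected list, named
def pvFoldB (grid : List (List String)) : List (Int × Int) :=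
  (PySem.List.pyRange 0 (grid.length : Int) 1).foldl (fun acc i =>
    (PySem.List.pyRange 0 ((grid.headD []).length : Int) 1).foldl (fun acc n =>
      if PySem.List.pyGetD (PySem.List.pyGetD grid i []) n "" == "@" ∧
         PySem.List.pyGetD (PySem.List.pyGetD (pvCounts grid) i []) n 0 < 4 then
        acc ++ [(i, n)]
      else acc) acc) []

-- the scatter fold, flattened over the row-major cell list
lemma pvCounts_flat (grid : List (List String)) :
    pvCounts grid
      = (pvCells (grid.length : Int) ((grid.headD []).length : Int)).foldl
          (pvStep grid (grid.length : Int) ((grid.headD []).length : Int))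
          (List.replicate grid.length
            (List.replicate (grid.headD []).length (0 : Int))) := by
  rw [pvCells, List.foldl_flatMap]
  simp only [List.foldl_map]
  rfl

-- the central fact: B's scattered counts gather A's voisins
lemma pvCounts_spec (grid : List (List String)) {p : Int × Int}
    (hp : pvInb (grid.length : Int) ((grid.headD []).length : Int) p = true) :
    pvGet2 (pvCounts grid) p = voisins grid p := by
  rw [pvCounts_flat,
    pvGet2_foldl_step grid _ _ (pvShape_init grid.length (grid.headD []).length) hp,
    pvGet2_init hp, pvCount_swap grid, ← pvVoisins_eq]
  ring

lemma pvFoldA_eq_pvFoldB (grid : List (List String)) : pvFoldA grid = pvFoldB grid := by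
  unfold pvFoldA pvFoldB
  apply PySem.List.foldl_congr_mem'
  intro i hi acc
  apply PySem.List.foldl_congr_mem'
  intro n hn acc'
  rw [PySem.List.mem_pyRange_one] at hi hn
  have hinb : pvInb (grid.length : Int) ((grid.headD []).length : Int) (i, n) = true := by
    simp only [pvInb, decide_eq_true_eq]
    exact ⟨hi.1, hi.2, hn.1, hn.2⟩
  have hvc := pvCounts_spec grid hinb
  simp only [pvGet2] at hvc
  rw [show voisins grid (i, n)
      = PySem.List.pyGetD (PySem.List.pyGetD (pvCounts grid) i []) n 0 from hvc.symm]
  split_ifs <;> tauto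

-- ===== VERDICT (by name: the statement is the Claim_ definition above) =====
theorem step_grid_spec : Claim_equal_step_grid := by
  intro grid _ _
  unfold Spec_step_grid
  by_cases hg : grid = []
  · subst hg; rfl
  · have hA : step_grid grid = ((pvFoldA grid).length : Int) := rfl
    have hB : step_grid_alt grid
        = if grid = [] then 0 else ((pvFoldB grid).length : Int) := rfl
    rw [hA, hB, if_neg hg, pvFoldA_eq_pvFoldB]
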